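-- pv_equiv track=rewrite | github.com/Tracer1337/activitiy-analyzer | analyzer/analyze.py | chunk_rows
-- ===== SOURCE A (Python) =====
-- get_date = lambda row: row[0]
--
-- def chunk_rows(rows):
--     # Create chunks containing all rows for one day
--     chunks = {}
--
--     while len(rows):
--         date = get_date(rows[0])
--         chunk = []
--
--         def next():
--             row = rows[0]
--             chunk.append(row)
--             rows.remove(row)
--
--         # Imitate a do-while loop
--         next()
--         while len(rows) and not get_date(rows[0]):
--             next()
--
--         chunks[date] = chunk
--
--     return chunks
-- ===== SOURCE B (Python) =====
-- def chunk_rows(rows):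
--     # Single forward pass: start a new group at each row whose date field is
--     # truthy (the very first row always starts one), then fold the groups into
--     # a dict.  Does not mutate `rows` (A empties it in place).
--     groups = []
--     for row in rows:
--         if row[0] or not groups:
--             groups.append((row[0], [row]))
--         else:
--             groups[-1][1].append(row)
--     chunks = {}
--     for date, chunk in groups:
--         chunks[date] = chunk
--     return chunks
-- ===== Notes on version B (the rewrite author's own statement) =====
-- stated objective: alternative
-- what changed: A repeatedly reads rows[0] and deletes it with rows.remove inside a nested while-loop, emptying its argument; B is a single non-mutating forward pass that starts a new (date, chunk) group at each truthy date field and then folds the groups into a dict.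
-- outside the precondition, e.g. on chunk_rows([[]]): A raises IndexError, B raises IndexError
import Mathlib
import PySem

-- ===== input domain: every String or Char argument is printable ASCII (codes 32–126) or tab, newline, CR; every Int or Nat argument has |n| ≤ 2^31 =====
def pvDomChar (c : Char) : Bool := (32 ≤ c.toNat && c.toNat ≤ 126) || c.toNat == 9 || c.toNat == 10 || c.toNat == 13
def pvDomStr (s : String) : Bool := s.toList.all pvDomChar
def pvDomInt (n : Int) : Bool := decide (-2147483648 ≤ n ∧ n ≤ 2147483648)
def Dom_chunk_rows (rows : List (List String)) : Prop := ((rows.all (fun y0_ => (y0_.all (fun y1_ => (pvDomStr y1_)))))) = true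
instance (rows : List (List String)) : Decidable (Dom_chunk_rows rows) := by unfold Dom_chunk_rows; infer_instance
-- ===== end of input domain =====

-- B replaces A's destructive read-head-then-remove while-loop by one non-mutating
-- forward pass grouping rows at truthy date fields (objective: alternative). A empties
-- `rows` in place; B does not mutate it — the equivalence proved is about the return value.

-- ===== PORT A =====
-- get_date = lambda row: row[0]; exact when row ≠ [] (Python raises IndexError on
-- an empty row — excluded by Pre_chunk_rows)
def pvGetDate (row : List String) : String := (PySem.List.pyGet? row 0).getD ""

-- the inner do-while: chunk.append(rows[0]); rows.remove(rows[0])  while the next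
-- date field is falsy (rows.remove(rows[0]) deletes index 0: the first equal element
-- is rows[0] itself). Returns (chunk, remaining rows).
def pvInner (chunk : List (List String)) : List (List String) → List (List String) × List (List String)
  | [] => (chunk, [])
  | r :: rest =>
      if pvGetDate r = "" then pvInner (chunk ++ [r]) rest
      else (chunk, r :: rest)

theorem pvInner_eq (l : List (List String)) (c : List (List String)) :
    pvInner c l = (c ++ l.takeWhile (fun x => pvGetDate x == ""),
                   l.dropWhile (fun x => pvGetDate x == "")) := by
  induction l generalizing c with
  | nil => simp [pvInner]
  | cons r rest ih =>
      by_cases h : pvGetDate r = "" <;>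
        simp [pvInner, h, ih]

-- the outer while-loop over the (shrinking) rows list
def pvOuter (chunks : PySem.Dict String (List (List String))) :
    List (List String) → PySem.Dict String (List (List String))
  | [] => chunks
  | r :: rest =>
      let date := pvGetDate r
      let p := pvInner [r] rest
      pvOuter (chunks.insert date p.1) p.2
termination_by l => l.length
decreasing_by
  simp only [pvInner_eq]
  have := List.length_dropWhile_le (p := fun x => pvGetDate x == "") (l := rest)
  simpa using Nat.lt_succ_of_le this

def chunk_rows (rows : List (List String)) : List (String × List (List String)) :=
  (pvOuter PySem.Dict.empty rows).items

-- ===== PORT B =====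
-- one step of B's grouping pass: new group if the date field is truthy or no
-- group exists yet, else append to the last group (groups kept head-first)
def pvStep (acc : List (String × List (List String))) (row : List String) :
    List (String × List (List String)) :=
  match acc with
  | [] => [(pvGetDate row, [row])]
  | (gd, gc) :: t =>
      if pvGetDate row ≠ "" then (pvGetDate row, [row]) :: (gd, gc) :: t
      else (gd, gc ++ [row]) :: t

def chunk_rows_alt (rows : List (List String)) : List (String × List (List String)) :=
  let groups := (rows.foldl pvStep []).reverse
  (groups.foldl (fun d p => d.insert p.1 p.2)
      (PySem.Dict.empty : PySem.Dict String (List (List String)))).items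

-- ===== PRECONDITION & SPEC =====
-- Pre_ excludes rows containing an empty row, on which Python A (row[0]) raises
-- IndexError (and B raises too).
def Pre_chunk_rows (rows : List (List String)) : Prop := ∀ r ∈ rows, r ≠ []
instance (rows : List (List String)) : Decidable (Pre_chunk_rows rows) := by
  unfold Pre_chunk_rows; infer_instance

def pvWitness_chunk_rows : List (List String) :=
  [["2020-01-01", "a"], ["", "b"], ["2020-01-02", "c"], ["", "d"]]

def Spec_chunk_rows (rows : List (List String)) (out : List (String × List (List String))) : Prop := out = chunk_rows_alt rows
instance (rows : List (List String)) (out : List (String × List (List String))) : Decidable (Spec_chunk_rows rows out) := by unfold Spec_chunk_rows; infer_instance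

-- ===== CLAIM (what is proved, stated in full; the proofs are below) =====
def Claim_equal_chunk_rows : Prop := ∀ (rows : List (List String)), Dom_chunk_rows rows → Pre_chunk_rows rows → Spec_chunk_rows rows (chunk_rows rows)

-- ===== LEMMAS AND PROOFS =====

-- reference grouping: the list of (date, chunk) groups, front to back
def pvG : List (List String) → List (String × List (List String))
  | [] => []
  | r :: rest =>
      (pvGetDate r, r :: rest.takeWhile (fun x => pvGetDate x == "")) ::
        pvG (rest.dropWhile (fun x => pvGetDate x == ""))
termination_by l => l.length
decreasing_by
  have := List.length_dropWhile_le (p := fun x => pvGetDate x == "") (l := rest)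
  simpa using Nat.lt_succ_of_le this

theorem pvOuter_eq (n : Nat) (rows : List (List String)) (hn : rows.length ≤ n)
    (d : PySem.Dict String (List (List String))) :
    pvOuter d rows = (pvG rows).foldl (fun d p => d.insert p.1 p.2) d := by
  induction n generalizing rows d with
  | zero =>
      have : rows = [] := List.eq_nil_of_length_eq_zero (Nat.le_zero.mp hn)
      subst this; simp [pvOuter, pvG]
  | succ n ih =>
      cases rows with
      | nil => simp [pvOuter, pvG]
      | cons r rest =>
          rw [pvOuter, pvG]
          simp only [pvInner_eq, List.foldl_cons]
          exact ih _ (by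
            have := List.length_dropWhile_le (p := fun x => pvGetDate x == "") (l := rest)
            simp only [List.length_cons] at hn
            omega) _

theorem foldl_pvStep (rows : List (List String)) (gd : String)
    (gc : List (List String)) (t : List (String × List (List String))) :
    rows.foldl pvStep ((gd, gc) :: t) =
      (pvG (rows.dropWhile (fun x => pvGetDate x == ""))).reverse ++
        (gd, gc ++ rows.takeWhile (fun x => pvGetDate x == "")) :: t := by
  induction rows generalizing gd gc t with
  | nil => simp [pvG]
  | cons r rest ih =>
      by_cases h : pvGetDate r = ""
      · simp only [List.foldl_cons, pvStep, ne_eq, not_true_eq_false, if_false,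
          List.dropWhile_cons, List.takeWhile_cons, h, beq_self_eq_true, if_true, ih]
        simp
      · simp only [List.foldl_cons, pvStep, ne_eq, h, not_false_eq_true, if_true, ih]
        rw [List.dropWhile_cons_of_neg (by simpa using h),
            List.takeWhile_cons_of_neg (by simpa using h), pvG]
        simp

theorem foldl_pvStep_nil (rows : List (List String)) :
    rows.foldl pvStep [] = (pvG rows).reverse := by
  cases rows with
  | nil => simp [pvG]
  | cons r rest =>
      have hstep : pvStep [] r = [(pvGetDate r, [r])] := rfl
      rw [List.foldl_cons, hstep, foldl_pvStep, pvG]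
      simp

-- ===== VERDICT (by name: the statement is the Claim_ definition above) =====
theorem chunk_rows_spec : Claim_equal_chunk_rows := by
  intro rows _ _
  unfold Spec_chunk_rows chunk_rows chunk_rows_alt
  rw [foldl_pvStep_nil, List.reverse_reverse,
      pvOuter_eq rows.length rows le_rfl]
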